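-- pv_equiv track=rewrite | github.com/scieloorg/packtools | packtools/sps/formats/pdf/renderer/docx/table.py | _detect_empty_columns
-- ===== SOURCE A (Python) =====
-- def _detect_empty_columns(headers, rows, num_cols):
-- 	"""Detect which columns are empty based on headers and rows. Returns a list of booleans."""
-- 	def _is_text_empty(v):
-- 		return v is None or (isinstance(v, str) and v.strip() == '')
--
-- 	empty_cols = [True] * num_cols
--
-- 	for hdr_row in headers or []:
-- 		for j in range(num_cols):
-- 			h = hdr_row[j] if j < len(hdr_row) else None
-- 			if not _is_text_empty(h):
-- 				empty_cols[j] = False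
--
-- 	for r in rows or []:
-- 		for j in range(num_cols):
-- 			if not empty_cols[j]:
-- 				continue
-- 			v = r[j] if j < len(r) else None
-- 			if not _is_text_empty(v):
-- 				empty_cols[j] = False
--
-- 	return empty_cols
-- ===== SOURCE B (Python) =====
-- from itertools import chain
--
-- def _detect_empty_columns(headers, rows, num_cols):
--     """Detect which columns are empty based on headers and rows. Returns a list of booleans."""
--     def _is_text_empty(v):
--         return v is None or (isinstance(v, str) and v.strip() == '')
--
--     def cell(row, j):
--         return row[j] if j < len(row) else None
--
--     return [
--         all(_is_text_empty(cell(row, j)) for row in chain(headers or [], rows or []))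
--         for j in range(num_cols)
--     ]
-- ===== Notes on version B (the rewrite author's own statement) =====
-- stated objective: simpler
-- what changed: Transposed the iteration to column-major: one short-circuiting all() per column over chain(headers, rows) in a comprehension, replacing the two separate row-major passes that mutate a boolean array.
import Mathlib
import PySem

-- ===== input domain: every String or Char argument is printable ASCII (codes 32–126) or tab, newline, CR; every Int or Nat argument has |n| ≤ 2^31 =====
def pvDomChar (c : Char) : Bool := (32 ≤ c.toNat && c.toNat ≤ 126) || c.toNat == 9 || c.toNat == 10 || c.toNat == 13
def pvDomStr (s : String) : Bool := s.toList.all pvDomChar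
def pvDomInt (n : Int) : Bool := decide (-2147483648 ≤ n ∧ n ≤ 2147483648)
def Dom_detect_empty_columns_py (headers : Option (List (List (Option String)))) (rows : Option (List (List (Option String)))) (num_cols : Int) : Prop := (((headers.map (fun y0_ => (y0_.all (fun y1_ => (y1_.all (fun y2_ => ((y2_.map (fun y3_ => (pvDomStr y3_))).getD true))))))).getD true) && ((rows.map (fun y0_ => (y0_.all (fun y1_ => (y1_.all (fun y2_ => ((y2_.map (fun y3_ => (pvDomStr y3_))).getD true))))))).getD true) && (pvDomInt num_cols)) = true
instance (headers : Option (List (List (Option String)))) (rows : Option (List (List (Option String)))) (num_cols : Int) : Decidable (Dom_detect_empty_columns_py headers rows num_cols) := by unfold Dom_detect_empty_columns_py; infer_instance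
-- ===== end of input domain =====

-- B iterates column-major (one short-circuiting all() per column over the chained header and
-- data rows) instead of A's two row-major mutating passes; objective: simpler.

-- ===== PORT A =====
-- _is_text_empty(v): v is None or (str and v.strip() == '')
def pvIsTextEmpty (v : Option String) : Bool :=
  match v with
  | none => true
  | some s => PySem.Str.strip s == ""

-- first loop body: for j in range(num_cols): h = hdr_row[j] if j < len(hdr_row) else None; …
def pvHdrStep (nc : Nat) (ec : List Bool) (hdr_row : List (Option String)) : List Bool :=
  (List.range nc).foldl
    (fun ec j =>
      let h := hdr_row.getD j none
      if !pvIsTextEmpty h then ec.set j false else ec) ec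

-- second loop body, with the 'if not empty_cols[j]: continue' guard
def pvRowStep (nc : Nat) (ec : List Bool) (r : List (Option String)) : List Bool :=
  (List.range nc).foldl
    (fun ec j =>
      if !(ec.getD j false) then ec
      else
        let v := r.getD j none
        if !pvIsTextEmpty v then ec.set j false else ec) ec

def detect_empty_columns_py (headers : Option (List (List (Option String)))) (rows : Option (List (List (Option String)))) (num_cols : Int) : List Bool :=
  let nc := num_cols.toNat          -- [True] * num_cols is [] for num_cols ≤ 0
  let ec := List.replicate nc true
  let ec := (headers.getD []).foldl (pvHdrStep nc) ec   -- for hdr_row in headers or []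
  let ec := (rows.getD []).foldl (pvRowStep nc) ec      -- for r in rows or []
  ec

-- ===== PORT B =====
-- cell(row, j): row[j] if j < len(row) else None
def pvCell (row : List (Option String)) (j : Nat) : Option String :=
  row.getD j none

def detect_empty_columns_py_alt (headers : Option (List (List (Option String)))) (rows : Option (List (List (Option String)))) (num_cols : Int) : List Bool :=
  (List.range num_cols.toNat).map
    (fun j => ((headers.getD []) ++ (rows.getD [])).all
      (fun row => pvIsTextEmpty (pvCell row j)))

-- ===== PRECONDITION & SPEC =====
def Spec_detect_empty_columns_py (headers : Option (List (List (Option String)))) (rows : Option (List (List (Option String)))) (num_cols : Int) (out : List Bool) : Prop := out = detect_empty_columns_py_alt headers rows num_cols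
instance (headers : Option (List (List (Option String)))) (rows : Option (List (List (Option String)))) (num_cols : Int) (out : List Bool) : Decidable (Spec_detect_empty_columns_py headers rows num_cols out) := by unfold Spec_detect_empty_columns_py; infer_instance

-- ===== CLAIM (what is proved, stated in full; the proofs are below) =====
def Claim_equal_detect_empty_columns_py : Prop := ∀ (headers : Option (List (List (Option String)))) (rows : Option (List (List (Option String)))) (num_cols : Int), Dom_detect_empty_columns_py headers rows num_cols → Spec_detect_empty_columns_py headers rows num_cols (detect_empty_columns_py headers rows num_cols)

-- ===== LEMMAS AND PROOFS =====

-- abbreviation used only in proofs: "the cell of `row` at column `j` is empty"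
def pvEmpAt (row : List (Option String)) (j : Nat) : Bool :=
  pvIsTextEmpty (row.getD j none)

theorem pv_getD_set (ec : List Bool) (i j : Nat) (b d : Bool) :
    (ec.set i b).getD j d = if i = j ∧ j < ec.length then b else ec.getD j d := by
  simp only [List.getD, List.getElem?_set]
  by_cases hij : i = j
  · subst hij
    by_cases hl : i < ec.length
    · simp [hl]
    · simp [hl]
  · simp [hij]

-- a fold whose step fixes the accumulator is the identity (used for the num_cols = 0 case)
theorem pv_foldl_id {α β : Type} (f : α → β → α) (hf : ∀ a b, f a b = a) :
    ∀ (l : List β) (a : α), l.foldl f a = a := by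
  intro l; induction l <;> simp_all

-- generic inner-loop lemma: a fold over a list of column indices whose step updates
-- exactly one index, and-ing in `emp` there, computes pointwise `ec[j] && emp j` for visited j
theorem pv_foldl_idx (g : List Bool → Nat → List Bool) (emp : Nat → Bool)
    (hlen : ∀ ec j', (g ec j').length = ec.length)
    (hget : ∀ (ec : List Bool) (j j' : Nat), j < ec.length →
      (g ec j').getD j false = if j' = j then ec.getD j false && emp j else ec.getD j false) :
    ∀ (l : List Nat) (ec : List Bool) (j : Nat), j < ec.length →
      (l.foldl g ec).length = ec.length ∧
      (l.foldl g ec).getD j false =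
        if j ∈ l then ec.getD j false && emp j else ec.getD j false := by
  intro l
  induction l with
  | nil => intro ec j hj; simp
  | cons a l ih =>
    intro ec j hj
    have hj' : j < (g ec a).length := by rw [hlen]; exact hj
    obtain ⟨ihlen, ihget⟩ := ih (g ec a) j hj'
    refine ⟨by rw [List.foldl_cons, ihlen, hlen], ?_⟩
    rw [List.foldl_cons, ihget, hget ec j a hj]
    simp only [List.mem_cons]
    by_cases haj : j = a <;> by_cases hmem : j ∈ l
    · rw [if_pos hmem, if_pos haj.symm, if_pos (Or.inl haj)]
      cases emp j <;> cases ec.getD j false <;> simp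
    · rw [if_neg hmem, if_pos haj.symm, if_pos (Or.inl haj)]
    · rw [if_pos hmem, if_neg (fun h => haj h.symm), if_pos (Or.inr hmem)]
    · rw [if_neg hmem, if_neg (fun h => haj h.symm),
        if_neg (by rintro (h | h); exacts [haj h, hmem h])]

theorem pv_hdrStep_props (nc : Nat) (row : List (Option String)) (ec : List Bool) (j : Nat)
    (hj : j < ec.length) :
    (pvHdrStep nc ec row).length = ec.length ∧
    (pvHdrStep nc ec row).getD j false =
      if j ∈ List.range nc then ec.getD j false && pvEmpAt row j else ec.getD j false := by
  refine pv_foldl_idx _ (pvEmpAt row) ?_ ?_ (List.range nc) ec j hj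
  · intro ec j'; dsimp only; cases pvIsTextEmpty (row.getD j' none) <;> simp
  · intro ec j j' hj
    dsimp only
    cases he : pvIsTextEmpty (row.getD j' none)
    · rw [Bool.not_false, if_pos rfl, pv_getD_set]
      by_cases hjj : j' = j
      · subst hjj; rw [if_pos ⟨rfl, hj⟩, if_pos rfl]
        simp_all [pvEmpAt, List.getD]
      · rw [if_neg (fun h => hjj h.1), if_neg hjj]
    · rw [Bool.not_true, if_neg Bool.false_ne_true]
      by_cases hjj : j' = j
      · subst hjj; rw [if_pos rfl]
        simp_all [pvEmpAt, List.getD]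
      · rw [if_neg hjj]

theorem pv_rowStep_props (nc : Nat) (row : List (Option String)) (ec : List Bool) (j : Nat)
    (hj : j < ec.length) :
    (pvRowStep nc ec row).length = ec.length ∧
    (pvRowStep nc ec row).getD j false =
      if j ∈ List.range nc then ec.getD j false && pvEmpAt row j else ec.getD j false := by
  refine pv_foldl_idx _ (pvEmpAt row) ?_ ?_ (List.range nc) ec j hj
  · intro ec j'; dsimp only
    cases ec.getD j' false <;> cases pvIsTextEmpty (row.getD j' none) <;> simp
  · intro ec j j' hj
    dsimp only
    cases hg : ec.getD j' false
    · rw [Bool.not_false, if_pos rfl]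
      by_cases hjj : j' = j
      · subst hjj; rw [if_pos rfl, hg]; simp
      · rw [if_neg hjj]
    · rw [Bool.not_true, if_neg Bool.false_ne_true]
      cases he : pvIsTextEmpty (row.getD j' none)
      · rw [Bool.not_false, if_pos rfl, pv_getD_set]
        by_cases hjj : j' = j
        · subst hjj; rw [if_pos ⟨rfl, hj⟩, if_pos rfl]
          simp_all [pvEmpAt, List.getD]
        · rw [if_neg (fun h => hjj h.1), if_neg hjj]
      · rw [Bool.not_true, if_neg Bool.false_ne_true]
        by_cases hjj : j' = j
        · subst hjj; rw [if_pos rfl, hg]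
          simp_all [pvEmpAt, List.getD]
        · rw [if_neg hjj]

-- outer loop: folding a per-row step over the row list ands in `pvEmpAt row j` for every row
theorem pv_outer (step : List Bool → List (Option String) → List Bool) (nc : Nat)
    (hstep : ∀ (row : List (Option String)) (ec : List Bool) (j : Nat), j < ec.length →
      (step ec row).length = ec.length ∧
      (step ec row).getD j false =
        if j ∈ List.range nc then ec.getD j false && pvEmpAt row j else ec.getD j false) :
    ∀ (L : List (List (Option String))) (ec : List Bool) (j : Nat),
      j < ec.length → ec.length = nc →
      (L.foldl step ec).length = ec.length ∧
      (L.foldl step ec).getD j false =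
        (ec.getD j false && L.all (fun row => pvEmpAt row j)) := by
  intro L
  induction L with
  | nil => intro ec j hj _; simp
  | cons r L ih =>
    intro ec j hj hnc
    obtain ⟨hl, hg⟩ := hstep r ec j hj
    have hj' : j < (step ec r).length := by rw [hl]; exact hj
    obtain ⟨ihl, ihg⟩ := ih (step ec r) j hj' (hl.trans hnc)
    refine ⟨by rw [List.foldl_cons, ihl, hl], ?_⟩
    rw [List.foldl_cons, ihg, hg, if_pos (List.mem_range.mpr (hnc ▸ hj))]
    simp [List.all_cons, Bool.and_assoc]

theorem detect_empty_columns_eq (headers rows : Option (List (List (Option String))))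
    (num_cols : Int) :
    detect_empty_columns_py headers rows num_cols
      = detect_empty_columns_py_alt headers rows num_cols := by
  unfold detect_empty_columns_py detect_empty_columns_py_alt
  set nc := num_cols.toNat with hnc
  set H := headers.getD [] with hH
  set R := rows.getD [] with hR
  have len0 : (List.replicate nc true).length = nc := List.length_replicate
  have hA : ∀ j, j < nc →
      ((R.foldl (pvRowStep nc) (H.foldl (pvHdrStep nc) (List.replicate nc true))).length = nc ∧
       (R.foldl (pvRowStep nc) (H.foldl (pvHdrStep nc) (List.replicate nc true))).getD j false =
         (H.all (fun row => pvEmpAt row j) && R.all (fun row => pvEmpAt row j))) := by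
    intro j hj
    obtain ⟨h1l, h1g⟩ := pv_outer (pvHdrStep nc) nc
      (fun row ec j hj => pv_hdrStep_props nc row ec j hj) H (List.replicate nc true) j
      (by rw [len0]; exact hj) len0
    obtain ⟨h2l, h2g⟩ := pv_outer (pvRowStep nc) nc
      (fun row ec j hj => pv_rowStep_props nc row ec j hj) R
      (H.foldl (pvHdrStep nc) (List.replicate nc true)) j
      (by rw [h1l, len0]; exact hj) (h1l.trans len0)
    refine ⟨by rw [h2l, h1l, len0], ?_⟩
    have hjr : j < (List.replicate nc true).length := by rw [len0]; exact hj
    rw [h2g, h1g, List.getD_eq_getElem (List.replicate nc true) false hjr]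
    simp
  have lenA : (R.foldl (pvRowStep nc) (H.foldl (pvHdrStep nc) (List.replicate nc true))).length
      = nc := by
    rcases Nat.eq_zero_or_pos nc with h0 | hp
    · rw [h0]
      have hid1 : ∀ (ec : List Bool) (row : List (Option String)), pvHdrStep 0 ec row = ec := by
        intro ec row; simp [pvHdrStep]
      have hid2 : ∀ (ec : List Bool) (row : List (Option String)), pvRowStep 0 ec row = ec := by
        intro ec row; simp [pvRowStep]
      rw [pv_foldl_id _ hid1 H, pv_foldl_id _ hid2 R]
      simp
    · exact (hA 0 hp).1
  apply List.ext_getElem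
  · simpa using lenA
  · intro j hj1 hj2
    have hjnc : j < nc := by rw [← lenA]; exact hj1
    have hval := (hA j hjnc).2
    rw [List.getD_eq_getElem _ _ hj1] at hval
    rw [hval]
    simp [List.all_append, pvEmpAt, pvCell]

-- ===== VERDICT (by name: the statement is the Claim_ definition above) =====
theorem detect_empty_columns_py_spec : Claim_equal_detect_empty_columns_py := by
  intro headers rows num_cols _
  exact detect_empty_columns_eq headers rows num_cols
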